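-- pv_equiv track=rewrite | github.com/LarryKithinji/Reddit-News-article-summary.- | app.py | _has_repetitive_phrases
-- ===== SOURCE A (Python) =====
-- def _has_repetitive_phrases(words: list) -> bool:
--     """Check if sentence contains repetitive phrases (3+ word sequences)."""
--     if len(
--             words
--     ) < 6:  # Need at least 6 words to have repetitive 3-word phrases
--         return False
--
--     # Create 3-word phrases
--     phrases = []
--     for i in range(len(words) - 2):
--         phrase = ' '.join(words[i:i + 3])
--         phrases.append(phrase)
--
--     # Check for duplicates
--     unique_phrases = set(phrases)
--     return len(phrases) > len(unique_phrases)
-- ===== SOURCE B (Python) =====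
-- def _has_repetitive_phrases(words: list) -> bool:
--     """Check if sentence contains repetitive phrases (3+ word sequences)."""
--     if len(words) < 6:
--         return False
--     phrases = sorted(' '.join(words[i:i + 3]) for i in range(len(words) - 2))
--     # sorted list: duplicates, if any, are adjacent
--     for a, b in zip(phrases, phrases[1:]):
--         if a == b:
--             return True
--     return False
-- ===== Notes on version B (the rewrite author's own statement) =====
-- stated objective: alternative
-- what changed: Replaces hash-set duplicate detection (build all phrases, compare len(phrases) with len(set(phrases))) by sort-then-adjacent-scan: sort the phrase list and return True on the first adjacent equal pair.
import Mathlib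
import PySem

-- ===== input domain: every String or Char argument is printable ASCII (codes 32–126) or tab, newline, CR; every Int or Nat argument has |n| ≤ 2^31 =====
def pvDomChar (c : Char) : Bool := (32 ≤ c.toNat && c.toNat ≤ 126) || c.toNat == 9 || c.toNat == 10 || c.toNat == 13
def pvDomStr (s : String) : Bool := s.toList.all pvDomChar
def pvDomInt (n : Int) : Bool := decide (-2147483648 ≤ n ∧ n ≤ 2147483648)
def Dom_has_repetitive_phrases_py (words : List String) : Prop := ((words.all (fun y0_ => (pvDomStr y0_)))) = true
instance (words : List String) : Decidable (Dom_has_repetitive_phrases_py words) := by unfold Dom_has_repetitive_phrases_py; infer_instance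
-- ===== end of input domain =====

-- B replaces A's set-based duplicate check by sort-then-adjacent-scan: an alternative algorithm, not claimed faster.

-- ===== PORT A =====
def has_repetitive_phrases_py (words : List String) : Bool :=
  if words.length < 6 then false
  else
    let phrases := (PySem.List.pyRange 0 ((words.length : Int) - 2) 1).foldl
      (fun acc i => acc ++ [PySem.Str.join " " (PySem.List.slice words (some i) (some (i + 3)))]) []
    decide ((PySem.Set.ofList phrases).length < phrases.length)

-- ===== PORT B =====
-- the zip(phrases, phrases[1:]) adjacent scan of Source B
def pvAdjDup : List String → Bool
  | a :: b :: t => a == b || pvAdjDup (b :: t)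
  | _ => false

def has_repetitive_phrases_py_alt (words : List String) : Bool :=
  if words.length < 6 then false
  else
    pvAdjDup (PySem.List.sorted
      ((PySem.List.pyRange 0 ((words.length : Int) - 2) 1).map
        (fun i => PySem.Str.join " " (PySem.List.slice words (some i) (some (i + 3)))))
      (fun x => x) false)

-- ===== PRECONDITION & SPEC =====
def Spec_has_repetitive_phrases_py (words : List String) (out : Bool) : Prop := out = has_repetitive_phrases_py_alt words
instance (words : List String) (out : Bool) : Decidable (Spec_has_repetitive_phrases_py words out) := by unfold Spec_has_repetitive_phrases_py; infer_instance

-- ===== CLAIM (what is proved, stated in full; the proofs are below) =====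
def Claim_equal_has_repetitive_phrases_py : Prop := ∀ (words : List String), Dom_has_repetitive_phrases_py words → Spec_has_repetitive_phrases_py words (has_repetitive_phrases_py words)

-- ===== LEMMAS AND PROOFS =====

theorem foldl_append_eq_map {α β : Type} (f : α → β) :
    ∀ (l : List α) (acc : List β),
      l.foldl (fun acc i => acc ++ [f i]) acc = acc ++ l.map f := by
  intro l
  induction l with
  | nil => simp
  | cons x xs ih => intro acc; simp [List.foldl, ih]

theorem ofList_length_lt_iff (l : List String) :
    (PySem.Set.ofList l).length < l.length ↔ ¬ l.Nodup := by
  have hnd : (PySem.Set.ofList l).Nodup := PySem.Set.nodup_ofList l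
  have hfin : (PySem.Set.ofList l).toFinset = l.toFinset := by
    ext x; simp [PySem.Set.mem_ofList]
  have h1 : (PySem.Set.ofList l).length = l.toFinset.card := by
    rw [← hfin, List.toFinset_card_of_nodup hnd]
  rw [h1, List.card_toFinset]
  constructor
  · intro h hnodup
    rw [hnodup.dedup] at h; omega
  · intro h
    have hsub := l.dedup_sublist
    have hle := hsub.length_le
    rcases lt_or_eq_of_le hle with hlt | heq
    · exact hlt
    · exact absurd (List.dedup_eq_self.mp (hsub.eq_of_length heq)) h

theorem pvAdjDup_iff (l : List String) (hp : l.Pairwise (· ≤ ·)) :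
    pvAdjDup l = true ↔ ¬ l.Nodup := by
  induction l with
  | nil => simp [pvAdjDup]
  | cons a t ih =>
    cases t with
    | nil => simp [pvAdjDup]
    | cons b t' =>
      rw [List.pairwise_cons] at hp
      obtain ⟨ha, htail⟩ := hp
      by_cases hab : a = b
      · subst hab
        constructor
        · intro _ hn
          exact (List.nodup_cons.mp hn).1 List.mem_cons_self
        · intro _
          simp [pvAdjDup]
      · have hIH := ih htail
        have hnotin : a ∉ b :: t' := by
          intro hmem
          rcases List.mem_cons.mp hmem with h | h
          · exact hab h
          · have h1 : a ≤ b := ha b List.mem_cons_self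
            have h2 : b ≤ a := (List.pairwise_cons.mp htail).1 a h
            exact hab (le_antisymm h1 h2)
        simp only [pvAdjDup, beq_iff_eq, Bool.or_eq_true]
        constructor
        · rintro (h | h)
          · exact absurd h hab
          · intro hn
            exact (hIH.mp h) hn.of_cons
        · intro hn
          right
          refine hIH.mpr (fun hnd => hn ?_)
          exact List.Nodup.cons hnotin hnd

-- ===== VERDICT (by name: the statement is the Claim_ definition above) =====
theorem has_repetitive_phrases_py_spec : Claim_equal_has_repetitive_phrases_py := by
  intro words _
  unfold Spec_has_repetitive_phrases_py has_repetitive_phrases_py has_repetitive_phrases_py_alt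
  by_cases h6 : words.length < 6
  · rw [if_pos h6, if_pos h6]
  · rw [if_neg h6, if_neg h6]
    set f : Int → String := fun i => PySem.Str.join " " (PySem.List.slice words (some i) (some (i + 3))) with hf
    set r := PySem.List.pyRange 0 ((words.length : Int) - 2) 1 with hr
    rw [foldl_append_eq_map f r []]
    simp only [List.nil_append]
    set phrases := r.map f with hph
    set s := PySem.List.sorted phrases (fun x => x) false with hs
    have hperm : s.Perm phrases := PySem.List.sorted_perm phrases (fun x => x) false
    have hpair : s.Pairwise (fun a b => (fun x => x) a ≤ (fun x => x) b) :=
      PySem.List.sorted_pairwise phrases (fun x => x)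
    have hiff := pvAdjDup_iff s hpair
    have hnodup : s.Nodup ↔ phrases.Nodup := hperm.nodup_iff
    have hlt := ofList_length_lt_iff phrases
    by_cases hd : phrases.Nodup
    · have : ¬ (PySem.Set.ofList phrases).length < phrases.length := by
        rw [hlt]; exact fun h => h hd
      cases hx : pvAdjDup s
      · exact decide_eq_false this
      · exact absurd (hnodup.mpr hd) (hiff.mp hx)
    · have h1 : (PySem.Set.ofList phrases).length < phrases.length := hlt.mpr hd
      rw [hiff.mpr (fun h => hd (hnodup.mp h))]
      exact decide_eq_true h1
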